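-- pv_equiv track=rewrite | github.com/DJamesVersion/loaprogs | Tahkmahnelle_MegaViz_Python.py | render_spatial_grid
-- ===== SOURCE A (Python) =====
-- def render_spatial_grid(x, y, z):
--     """Renders a simplified ASCII 3D coordinate space visualization."""
--
--     MAX_COORD = 10
--
--     # Clamp coordinates for visualization
--     x_display = max(0, min(MAX_COORD, x))
--     y_display = max(0, min(MAX_COORD, y))
--     z_display = max(0, min(MAX_COORD, z))
--
--     grid = []
--
--     for row in range(MAX_COORD + 1):
--         line_content = ['.'] * (MAX_COORD * 2 + 1)
--
--         # Add Y label
--         y_label = 'Y' if row == MAX_COORD // 2 else ' '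
--         line_str = [y_label] + line_content
--
--         # Place the current location marker '@'
--         if row == MAX_COORD - y_display: # Y axis is inverted for console display
--
--             x_pos = 1 + x_display * 2
--             x_pos -= z_display // 2 # Apply Z offset for depth illusion
--
--             # Ensure position is within the line bounds
--             pos_index = max(1, min(len(line_str) - 1, x_pos))
--
--             if 0 < pos_index < len(line_str):
--                 line_str[pos_index] = '@'
--
--         grid.append("".join(line_str))
--
--     # Add X-axis label (horizontal)
--     x_axis_label = " " + "0" + "--" * (MAX_COORD // 2) + "X" + "--" * (MAX_COORD // 2)
--     grid.append(x_axis_label)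
--
--     # Key
--     key = (
--         f"Current Spatial Location: X={x}, Y={y}, Z={z}\n"
--         "Axes: Resources (X) | Knowledge (Y) | Depth (Z)"
--     )
--
--     return "\n".join(grid), key
-- ===== SOURCE B (Python) =====
-- def render_spatial_grid(x, y, z):
--     """Renders a simplified ASCII 3D coordinate space visualization."""
--     M = 10
--
--     x_d = max(0, min(M, x))
--     y_d = max(0, min(M, y))
--     z_d = max(0, min(M, z))
--
--     target = M - y_d                      # console Y axis is inverted
--     pos = max(1, min(2 * M + 1, 1 + x_d * 2 - z_d // 2))
--
--     def cell(r, c):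
--         # pure per-cell renderer: character at row r, column c
--         if r == target and c == pos:
--             return '@'
--         if c == 0:
--             return 'Y' if r == M // 2 else ' '
--         return '.'
--
--     lines = [''.join(cell(r, c) for c in range(2 * M + 2)) for r in range(M + 1)]
--     lines.append(' 0' + '-' * M + 'X' + '-' * M)
--
--     key = (f"Current Spatial Location: X={x}, Y={y}, Z={z}\n"
--            "Axes: Resources (X) | Knowledge (Y) | Depth (Z)")
--     return '\n'.join(lines), key
-- ===== Notes on version B (the rewrite author's own statement) =====
-- stated objective: alternative
-- what changed: B replaces A's imperative build-then-patch loop (construct each row as a char list, conditionally overwrite one cell inside the loop) with a pure per-cell renderer: the marker row/column are computed up front and every character of the grid is produced directly by a function of (row, col), with no list mutation at all.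
import Mathlib
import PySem

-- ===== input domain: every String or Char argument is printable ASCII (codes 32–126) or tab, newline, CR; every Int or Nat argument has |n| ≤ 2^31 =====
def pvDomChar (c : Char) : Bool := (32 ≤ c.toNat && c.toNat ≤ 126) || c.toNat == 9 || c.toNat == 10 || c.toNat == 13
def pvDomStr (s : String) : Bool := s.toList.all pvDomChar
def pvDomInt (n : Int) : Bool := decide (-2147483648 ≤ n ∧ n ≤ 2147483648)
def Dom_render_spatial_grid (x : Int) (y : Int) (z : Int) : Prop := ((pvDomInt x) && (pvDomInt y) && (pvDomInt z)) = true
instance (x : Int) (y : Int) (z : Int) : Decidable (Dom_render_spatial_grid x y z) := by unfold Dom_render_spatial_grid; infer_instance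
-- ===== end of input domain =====

-- B renders every grid character directly by a pure function of (row, col) instead of
-- building rows and patching one cell — an alternative, mutation-free decomposition.

-- ===== PORT A =====
def render_spatial_grid (x : Int) (y : Int) (z : Int) : String × String :=
  let MAX_COORD : Int := 10
  let x_display := max 0 (min MAX_COORD x)
  let y_display := max 0 (min MAX_COORD y)
  let z_display := max 0 (min MAX_COORD z)
  let grid : List String :=
    (PySem.List.pyRange 0 (MAX_COORD + 1) 1).foldl (fun g row =>
      let line_content : List Char := List.replicate (MAX_COORD * 2 + 1).toNat '.'
      let y_label : Char := if row = PySem.Int.floordiv MAX_COORD 2 then 'Y' else ' '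
      let line_str : List Char := y_label :: line_content
      let line_str :=
        if row = MAX_COORD - y_display then
          let x_pos := 1 + x_display * 2
          let x_pos := x_pos - PySem.Int.floordiv z_display 2
          let pos_index := max 1 (min ((line_str.length : Int) - 1) x_pos)
          if 0 < pos_index ∧ pos_index < (line_str.length : Int) then
            PySem.List.pySetD line_str pos_index '@'   -- in-range by the guard
          else line_str
        else line_str
      g ++ [String.ofList line_str]) []   -- "".join of 1-char strings = ofList
  let x_axis_label : String := String.ofList
    ([' '] ++ ['0'] ++ (List.replicate (PySem.Int.floordiv MAX_COORD 2).toNat ['-','-']).flatten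
      ++ ['X'] ++ (List.replicate (PySem.Int.floordiv MAX_COORD 2).toNat ['-','-']).flatten)
  let grid := grid ++ [x_axis_label]
  let key : String := String.ofList
    ("Current Spatial Location: X=".toList ++ PySem.Int.toChars x ++ ", Y=".toList ++ PySem.Int.toChars y
      ++ ", Z=".toList ++ PySem.Int.toChars z ++ "\nAxes: Resources (X) | Knowledge (Y) | Depth (Z)".toList)
  (PySem.Str.join "\n" grid, key)

-- ===== PORT B =====
def render_spatial_grid_alt (x : Int) (y : Int) (z : Int) : String × String :=
  let M : Int := 10
  let x_d := max 0 (min M x)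
  let y_d := max 0 (min M y)
  let z_d := max 0 (min M z)
  let target := M - y_d
  let pos := max 1 (min (2 * M + 1) (1 + x_d * 2 - PySem.Int.floordiv z_d 2))
  let cell : Int → Int → Char := fun r c =>
    if r = target ∧ c = pos then '@'
    else if c = 0 then (if r = PySem.Int.floordiv M 2 then 'Y' else ' ')
    else '.'
  let lines : List String :=
    (PySem.List.pyRange 0 (M + 1) 1).map (fun r =>
      String.ofList ((PySem.List.pyRange 0 (2 * M + 2) 1).map (cell r)))
  let lines := lines ++ [String.ofList ([' '] ++ ['0'] ++ List.replicate M.toNat '-' ++ ['X'] ++ List.replicate M.toNat '-')]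
  let key : String := String.ofList
    ("Current Spatial Location: X=".toList ++ PySem.Int.toChars x ++ ", Y=".toList ++ PySem.Int.toChars y
      ++ ", Z=".toList ++ PySem.Int.toChars z ++ "\nAxes: Resources (X) | Knowledge (Y) | Depth (Z)".toList)
  (PySem.Str.join "\n" lines, key)

-- ===== PRECONDITION & SPEC =====
def Spec_render_spatial_grid (x : Int) (y : Int) (z : Int) (out : String × String) : Prop := out = render_spatial_grid_alt x y z
instance (x : Int) (y : Int) (z : Int) (out : String × String) : Decidable (Spec_render_spatial_grid x y z out) := by unfold Spec_render_spatial_grid; infer_instance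

-- ===== CLAIM (what is proved, stated in full; the proofs are below) =====
def Claim_equal_render_spatial_grid : Prop := ∀ (x : Int) (y : Int) (z : Int), Dom_render_spatial_grid x y z → Spec_render_spatial_grid x y z (render_spatial_grid x y z)

-- ===== LEMMAS AND PROOFS =====

-- ===== VERDICT (by name: the statement is the Claim_ definition above) =====
set_option maxRecDepth 10000 in
theorem render_spatial_grid_spec : Claim_equal_render_spatial_grid := by
  unfold Claim_equal_render_spatial_grid
  intro x y z _
  unfold Spec_render_spatial_grid
  simp only [render_spatial_grid, render_spatial_grid_alt,
    List.length_cons, List.length_replicate,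
    PySem.Int.floordiv_eq_ediv_of_pos (show (0:Int) < 2 by norm_num)]
  norm_num
  generalize ht : 10 - max 0 (min 10 y) = t
  generalize hp : max 1 (min 21 (1 + max 0 (min 10 x) * 2 - max 0 (min 10 z) / 2)) = p
  have ht1 : 0 ≤ t := by omega
  have ht2 : t ≤ 10 := by omega
  have hp1 : 1 ≤ p := by omega
  have hp2 : p ≤ 21 := by omega
  clear ht hp
  interval_cases t <;> interval_cases p <;> rfl
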